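-- pv_equiv track=rewrite | github.com/musclefrog/Programmers_Algorithm | 프로그래머스/3/12987. 숫자 게임/숫자 게임.py | solution
-- ===== SOURCE A (Python) =====
-- def solution(A, B):
--     answer = 0
--     A = sorted(A, reverse=True)
--     B = sorted(B, reverse=True)
--
--     p = 0
--
--     for i in range(len(A)):
--         for j in range(p, len(B)):
--             if A[i] < B[j]:
--                 answer += 1
--                 p = j + 1
--                 break
--
--     return answer
-- ===== SOURCE B (Python) =====
-- def solution(A, B):
--     As = sorted(A, reverse=True)
--     Bs = sorted(B, reverse=True)
--     answer = 0
--     p = 0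
--     for a in As:
--         if p < len(Bs) and a < Bs[p]:
--             answer += 1
--             p += 1
--     return answer
-- ===== Notes on version B (the rewrite author's own statement) =====
-- stated objective: faster
-- what changed: Replaced A's nested loops (an inner scan of B from pointer p with a break, worst-case quadratic when no beating element exists) by a single two-pointer sweep over sorted A that compares only B[p] at each step.
import Mathlib
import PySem

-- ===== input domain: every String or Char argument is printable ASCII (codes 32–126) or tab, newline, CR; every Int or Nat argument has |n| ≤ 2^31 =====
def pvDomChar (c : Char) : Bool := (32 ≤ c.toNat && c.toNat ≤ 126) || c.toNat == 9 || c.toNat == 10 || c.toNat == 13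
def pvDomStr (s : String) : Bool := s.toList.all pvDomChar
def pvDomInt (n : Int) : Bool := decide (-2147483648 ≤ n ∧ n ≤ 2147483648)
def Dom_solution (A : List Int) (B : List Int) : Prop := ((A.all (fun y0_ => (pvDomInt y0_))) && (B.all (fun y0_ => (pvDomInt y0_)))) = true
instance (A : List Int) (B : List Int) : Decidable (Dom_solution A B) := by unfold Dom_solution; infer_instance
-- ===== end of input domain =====

-- B replaces A's nested loops (inner scan of B[p:] with a break; worst-case quadratic)
-- by a single two-pointer sweep over sorted A comparing only B[p]; objective: faster.

-- ===== PORT A =====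
-- inner loop 'for j in range(p, len(B)): if A[i] < B[j]: …; break' — returns the j it breaks at
def solFind (a : Int) (Bs : List Int) (js : List Int) : Option Int :=
  match js with
  | [] => none
  | j :: rest => if a < PySem.List.pyGetD Bs j 0 then some j else solFind a Bs rest

-- body of the outer loop: state (answer, p)
def solStepA (Bs : List Int) (st : Int × Int) (a : Int) : Int × Int :=
  match solFind a Bs (PySem.List.pyRange st.2 (Bs.length : Int) 1) with
  | some j => (st.1 + 1, j + 1)
  | none => st

def solution (A : List Int) (B : List Int) : Int :=
  let As := PySem.List.sorted A (fun x => x) true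
  let Bs := PySem.List.sorted B (fun x => x) true
  ((PySem.List.pyRange 0 (As.length : Int) 1).foldl
      (fun st i => solStepA Bs st (PySem.List.pyGetD As i 0)) ((0 : Int), (0 : Int))).1

-- ===== PORT B =====
def solution_alt (A : List Int) (B : List Int) : Int :=
  let As := PySem.List.sorted A (fun x => x) true
  let Bs := PySem.List.sorted B (fun x => x) true
  (As.foldl
      (fun st a =>
        if st.2 < (Bs.length : Int) ∧ a < PySem.List.pyGetD Bs st.2 0
        then (st.1 + 1, st.2 + 1) else st)
      ((0 : Int), (0 : Int))).1

-- ===== PRECONDITION & SPEC =====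
def Spec_solution (A : List Int) (B : List Int) (out : Int) : Prop := out = solution_alt A B
instance (A : List Int) (B : List Int) (out : Int) : Decidable (Spec_solution A B out) := by unfold Spec_solution; infer_instance

-- ===== CLAIM (what is proved, stated in full; the proofs are below) =====
def Claim_equal_solution : Prop := ∀ (A : List Int) (B : List Int), Dom_solution A B → Spec_solution A B (solution A B)

-- ===== LEMMAS AND PROOFS =====

-- if no j in js beats a, the inner scan finds nothing
lemma solFind_none (a : Int) (Bs js : List Int)
    (h : ∀ j ∈ js, ¬ a < PySem.List.pyGetD Bs j 0) : solFind a Bs js = none := by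
  induction js with
  | nil => rfl
  | cons j rest ih =>
      simp only [solFind]
      rw [if_neg (h j (List.mem_cons_self))]
      exact ih (fun x hx => h x (List.mem_cons_of_mem _ hx))

-- on a descending-sorted Bs, the inner scan from p either breaks at p itself or finds nothing
lemma solFind_eq (Bs : List Int) (hB : Bs.Pairwise (fun x y => y ≤ x)) (a p : Int) (hp : 0 ≤ p) :
    solFind a Bs (PySem.List.pyRange p (Bs.length : Int) 1) =
      if p < (Bs.length : Int) ∧ a < PySem.List.pyGetD Bs p 0 then some p else none := by
  by_cases hlt : p < (Bs.length : Int)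
  · rw [PySem.List.pyRange_one_cons hlt]
    simp only [solFind]
    by_cases hbeat : a < PySem.List.pyGetD Bs p 0
    · rw [if_pos hbeat, if_pos ⟨hlt, hbeat⟩]
    · rw [if_neg hbeat, if_neg (by exact fun h => hbeat h.2)]
      apply solFind_none
      intro j hj
      have hjmem := (PySem.List.mem_pyRange_one).1 hj
      have hj0 : 0 ≤ j := by omega
      have hjlen : j < (Bs.length : Int) := hjmem.2
      rw [PySem.List.pyGetD_eq_getElem Bs 0 hj0 hjlen]
      rw [PySem.List.pyGetD_eq_getElem Bs 0 hp hlt] at hbeat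
      have hindex : p.toNat < j.toNat := by omega
      have := (List.pairwise_iff_getElem.1 hB) p.toNat j.toNat
        (by omega) (by omega) hindex
      omega
  · rw [PySem.List.pyRange_one_eq_nil (by omega), if_neg (by exact fun h => hlt h.1)]
    rfl

-- with Bs sorted descending, A's outer loop and B's sweep run in lock-step
lemma fold_eq (Bs : List Int) (hB : Bs.Pairwise (fun x y => y ≤ x)) :
    ∀ (As : List Int) (st : Int × Int), 0 ≤ st.2 →
      As.foldl (fun st a => solStepA Bs st a) st =
      As.foldl
        (fun st a =>
          if st.2 < (Bs.length : Int) ∧ a < PySem.List.pyGetD Bs st.2 0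
          then (st.1 + 1, st.2 + 1) else st) st := by
  intro As
  induction As with
  | nil => intro st _; rfl
  | cons a rest ih =>
      intro st hst
      simp only [List.foldl_cons]
      have hstep : solStepA Bs st a =
          if st.2 < (Bs.length : Int) ∧ a < PySem.List.pyGetD Bs st.2 0
          then (st.1 + 1, st.2 + 1) else st := by
        unfold solStepA
        rw [solFind_eq Bs hB a st.2 hst]
        split_ifs <;> rfl
      rw [hstep]
      split_ifs with hc
      · exact ih (st.1 + 1, st.2 + 1) (by simp; omega)
      · exact ih st hst

-- ===== VERDICT (by name: the statement is the Claim_ definition above) =====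
theorem solution_spec : Claim_equal_solution := by
  intro A B _
  unfold Spec_solution solution solution_alt
  dsimp only
  rw [PySem.List.foldl_pyRange_zero_pyGetD'
        (PySem.List.sorted A (fun x => x) true) 0
        (solStepA (PySem.List.sorted B (fun x => x) true)) ((0 : Int), (0 : Int))]
  rw [fold_eq _ (PySem.List.sorted_pairwise_rev B (fun x => x)) _ _ (by norm_num)]
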